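-- pv_equiv track=rewrite | github.com/Evan-Gao/SLTK | sltk/utils/span_prf.py | get_span_nodict
-- ===== SOURCE A (Python) =====
-- def get_span_nodict(sent_labels):
--     """
--     get success answer spans in a sequence
--     :param pred_label: ndarray !NOTE: the span is 前闭后开
--     :return: list of tuple spans
--     """
--     span = []
--     for i, word_label in enumerate(sent_labels):
--         if word_label == 'S':
--             if i + 1 == len(sent_labels):
--                 span.append((i, i + 1))
--             elif sent_labels[i + 1] == 'O':
--                 span.append((i, i + 1))
--             continue
--         if word_label == 'B':
--             if i + 1 == len(sent_labels): # 判断是不是最后一个字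
--                 continue
--             elif sent_labels[i + 1] == 'E': # 判断是不是BE
--                 span.append((i, i + 2))
--             elif sent_labels[i + 1] == 'I': # 判断是不是BI...IE
--                 j = i
--                 while j + 1 != len(sent_labels) and sent_labels[j + 1] == 'I':
--                     j += 1
--                 if j + 1 != len(sent_labels) and sent_labels[j + 1] == 'E':
--                     span.append((i, j+2))
--     return span
-- ===== SOURCE B (Python) =====
-- def get_span_nodict(sent_labels):
--     """Single forward pass: a tiny state machine carrying the pending 'S' index and
--     the start of the current 'B','I'... run, instead of A's lookahead + inner while."""
--     span = []
--     s_pend = None   # index of an 'S' waiting to see whether the next label is 'O' (or end)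
--     b_start = None  # start index of a live 'B' 'I'* run
--     for i, lab in enumerate(sent_labels):
--         if s_pend is not None:
--             if lab == 'O':
--                 span.append((s_pend, s_pend + 1))
--             s_pend = None
--         if lab == 'S':
--             s_pend = i
--             b_start = None
--         elif lab == 'B':
--             b_start = i
--         elif lab == 'E':
--             if b_start is not None:
--                 span.append((b_start, i + 1))
--             b_start = None
--         elif lab != 'I':
--             b_start = None
--     if s_pend is not None:
--         span.append((s_pend, s_pend + 1))
--     return span
-- ===== Notes on version B (the rewrite author's own statement) =====
-- stated objective: alternative
-- what changed: A scans with lookahead (peeking at sent_labels[i+1] and an inner while loop that re-walks the 'I' run); B is a single forward pass state machine that carries the pending 'S' index and the start of the live 'B','I'* run and emits each span when its closing label (or the end) is reached.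
import Mathlib
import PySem

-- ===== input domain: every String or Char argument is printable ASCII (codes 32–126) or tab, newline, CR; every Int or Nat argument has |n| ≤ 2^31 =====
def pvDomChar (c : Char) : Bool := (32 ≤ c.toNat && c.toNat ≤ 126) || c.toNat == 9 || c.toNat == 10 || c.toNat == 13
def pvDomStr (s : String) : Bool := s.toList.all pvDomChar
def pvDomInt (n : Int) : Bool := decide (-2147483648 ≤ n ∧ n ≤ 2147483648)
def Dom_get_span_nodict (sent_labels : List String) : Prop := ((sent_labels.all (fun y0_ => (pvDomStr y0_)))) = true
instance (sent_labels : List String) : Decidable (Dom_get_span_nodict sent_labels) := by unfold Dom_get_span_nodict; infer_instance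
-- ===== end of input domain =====

-- B replaces A's lookahead-with-inner-while scan by a single forward pass carrying
-- the pending 'S' index and the start of the live 'B','I'* run (objective: alternative).

-- ===== PORT A =====
-- the inner `while j + 1 != len(...) and sent_labels[j+1] == 'I': j += 1` loop
def aJ (l : List String) (j : Nat) : Nat :=
  if j + 1 ≠ l.length ∧ l.getD (j + 1) "" = "I" then aJ l (j + 1) else j
termination_by l.length - j
decreasing_by
  rename_i h
  have hlt : j + 1 < l.length := by
    by_contra hc
    have hn : l[j + 1]? = none := by
      rw [List.getElem?_eq_none_iff]; omega
    simp [List.getD, hn] at h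
  omega

def get_span_nodict (sent_labels : List String) : List (Int × Int) :=
  (List.range sent_labels.length).foldl (fun span i =>
    let word_label := sent_labels.getD i ""
    if word_label = "S" then
      if i + 1 = sent_labels.length then span ++ [((i : Int), (i : Int) + 1)]
      else if sent_labels.getD (i + 1) "" = "O" then span ++ [((i : Int), (i : Int) + 1)]
      else span
    else if word_label = "B" then
      if i + 1 = sent_labels.length then span
      else if sent_labels.getD (i + 1) "" = "E" then span ++ [((i : Int), (i : Int) + 2)]
      else if sent_labels.getD (i + 1) "" = "I" then
        let j := aJ sent_labels i
        if j + 1 ≠ sent_labels.length ∧ sent_labels.getD (j + 1) "" = "E" then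
          span ++ [((i : Int), (j : Int) + 2)]
        else span
      else span
    else span) []

-- ===== PORT B =====
def bLoop (i : Nat) (s_pend b_start : Option Nat) (span : List (Int × Int)) :
    List String → List (Int × Int)
  | [] =>
    match s_pend with
    | some s => span ++ [((s : Int), (s : Int) + 1)]
    | none => span
  | lab :: rest =>
    let span1 :=
      match s_pend with
      | some s => if lab = "O" then span ++ [((s : Int), (s : Int) + 1)] else span
      | none => span
    if lab = "S" then bLoop (i + 1) (some i) none span1 rest
    else if lab = "B" then bLoop (i + 1) none (some i) span1 rest
    else if lab = "E" then
      bLoop (i + 1) none none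
        (match b_start with
         | some b => span1 ++ [((b : Int), (i : Int) + 1)]
         | none => span1) rest
    else if lab = "I" then bLoop (i + 1) none b_start span1 rest
    else bLoop (i + 1) none none span1 rest

def get_span_nodict_alt (sent_labels : List String) : List (Int × Int) :=
  bLoop 0 none none [] sent_labels

-- ===== PRECONDITION & SPEC =====
def Spec_get_span_nodict (sent_labels : List String) (out : List (Int × Int)) : Prop := out = get_span_nodict_alt sent_labels
instance (sent_labels : List String) (out : List (Int × Int)) : Decidable (Spec_get_span_nodict sent_labels out) := by unfold Spec_get_span_nodict; infer_instance

-- ===== CLAIM (what is proved, stated in full; the proofs are below) =====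
def Claim_equal_get_span_nodict : Prop := ∀ (sent_labels : List String), Dom_get_span_nodict sent_labels → Spec_get_span_nodict sent_labels (get_span_nodict sent_labels)

-- ===== LEMMAS AND PROOFS =====

-- number of leading "I" labels
def leadI : List String → Nat
  | [] => 0
  | x :: t => if x = "I" then leadI t + 1 else 0

-- reference spans of the suffix starting at absolute position i
def F (i : Nat) : List String → List (Int × Int)
  | [] => []
  | lab :: t =>
    (if lab = "S" then
       (if t = [] ∨ t.head? = some "O" then [((i : Int), (i : Int) + 1)] else [])
     else if lab = "B" then
       (if (t.drop (leadI t)).head? = some "E" then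
          [((i : Int), (i : Int) + (leadI t : Int) + 2)]
        else [])
     else []) ++ F (i + 1) t

-- pending-'S' contribution
def E1 (s_pend : Option Nat) (rest : List String) : List (Int × Int) :=
  match s_pend with
  | some s => if rest = [] ∨ rest.head? = some "O" then [((s : Int), (s : Int) + 1)] else []
  | none => []

-- live 'B'-run contribution
def E2 (b_start : Option Nat) (i : Nat) (rest : List String) : List (Int × Int) :=
  match b_start with
  | some b =>
    if (rest.drop (leadI rest)).head? = some "E" then
      [((b : Int), (i : Int) + (leadI rest : Int) + 1)]
    else []
  | none => []

lemma leadI_le (t : List String) : leadI t ≤ t.length := by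
  induction t with
  | nil => simp [leadI]
  | cons x t ih =>
    by_cases h : x = "I"
    · simp [leadI, h]; omega
    · simp [leadI, h]

lemma bLoop_eq (rest : List String) : ∀ (i : Nat) (s_pend b_start : Option Nat) (span : List (Int × Int)),
    bLoop i s_pend b_start span rest = span ++ E1 s_pend rest ++ E2 b_start i rest ++ F i rest := by
  induction rest with
  | nil =>
    intro i sp bs span
    cases sp <;> cases bs <;> simp [bLoop, E1, E2, F, leadI]
  | cons lab t ih =>
    intro i sp bs span
    by_cases hS : lab = "S"
    · subst hS
      cases sp <;> cases bs <;>
        simp [bLoop, ih, E1, E2, F, leadI]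
    · by_cases hB : lab = "B"
      · subst hB
        cases sp <;> cases bs <;>
          · simp [bLoop, ih, E1, E2, F, leadI]
            try ring_nf
      · by_cases hE : lab = "E"
        · subst hE
          cases sp <;> cases bs <;>
            simp [bLoop, ih, E1, E2, F, leadI]
        · by_cases hI : lab = "I"
          · subst hI
            cases sp <;> cases bs <;>
              · simp [bLoop, ih, E1, E2, F, leadI, hS, hB, hE]
                try push_cast
                try ring_nf
          · cases sp <;> cases bs <;>
              · simp [bLoop, ih, E1, E2, F, leadI, hS, hB, hE, hI]
                try (split_ifs <;> simp)

-- A's per-index emission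
def emitA (l : List String) (i : Nat) : List (Int × Int) :=
  let w := l.getD i ""
  if w = "S" then
    (if i + 1 = l.length then [((i : Int), (i : Int) + 1)]
     else if l.getD (i + 1) "" = "O" then [((i : Int), (i : Int) + 1)]
     else [])
  else if w = "B" then
    (if i + 1 = l.length then []
     else if l.getD (i + 1) "" = "E" then [((i : Int), (i : Int) + 2)]
     else if l.getD (i + 1) "" = "I" then
       (if aJ l i + 1 ≠ l.length ∧ l.getD (aJ l i + 1) "" = "E" then
          [((i : Int), (aJ l i : Int) + 2)]
        else [])
     else [])
  else []

lemma foldA_eq (l : List String) :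
    get_span_nodict l = (List.range l.length).flatMap (emitA l) := by
  rw [get_span_nodict, List.flatMap_eq_foldl]
  apply List.foldl_ext
  intro span i _
  simp only [emitA]
  split_ifs <;> simp

lemma aJ_eq (l : List String) (t : List String) : ∀ i, l.drop (i + 1) = t → aJ l i = i + leadI t := by
  induction t with
  | nil =>
    intro i h
    have hlen : l.length ≤ i + 1 := by
      have := List.drop_eq_nil_iff.mp h; omega
    have hn : l[i + 1]? = none := by rw [List.getElem?_eq_none_iff]; omega
    rw [aJ]
    simp [List.getD, hn, leadI]
  | cons c t ih =>
    intro i h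
    have hx : l[i + 1]? = some c := by rw [← List.head?_drop, h]; rfl
    obtain ⟨hlt, -⟩ := List.getElem?_eq_some_iff.mp hx
    have hget : l.getD (i + 1) "" = c := by simp [List.getD, hx]
    by_cases hc : c = "I"
    · subst hc
      rw [aJ]
      have hrec : aJ l (i + 1) = (i + 1) + leadI t := by
        apply ih
        rw [← List.drop_drop, h]; rfl
      rw [if_pos ⟨by omega, hget⟩, hrec]
      simp [leadI]; omega
    · rw [aJ]
      simp [List.getD, hx, hc, leadI]

lemma flatMap_emitA (l : List String) (t : List String) :
    ∀ i, l.drop i = t → (List.range' i t.length).flatMap (emitA l) = F i t := by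
  induction t with
  | nil => intro i h; simp [F]
  | cons lab t ih =>
    intro i h
    have hi : i < l.length := by
      by_contra hc
      rw [List.drop_eq_nil_iff.mpr (by omega)] at h
      simp at h
    have hdt : l.drop (i + 1) = t := by
      rw [← List.drop_drop, h]; rfl
    have hlen : t.length = l.length - (i + 1) := by
      rw [← hdt, List.length_drop]
    have hxi : l[i]? = some lab := by rw [← List.head?_drop, h]; rfl
    have hend : i + 1 = l.length ↔ t = [] := by
      rw [← hdt, List.drop_eq_nil_iff]
      constructor <;> intro <;> omega
    simp only [List.length_cons]
    rw [List.range'_succ, List.flatMap_cons, ih (i + 1) hdt]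
    simp only [F]
    congr 1
    -- remaining: emitA l i = the head contribution of F i (lab :: t)
    cases t with
    | nil =>
      have h1 : i + 1 = l.length := hend.mpr rfl
      simp only [emitA, List.getD, hxi, Option.getD_some, h1]
      split_ifs <;> simp_all [leadI]
    | cons a t' =>
      have hxa : l[i + 1]? = some a := by rw [← List.head?_drop, hdt]; rfl
      obtain ⟨hlt1, -⟩ := List.getElem?_eq_some_iff.mp hxa
      have hne : ¬ i + 1 = l.length := by omega
      by_cases hS : lab = "S"
      · subst hS
        by_cases hO : a = "O" <;>
          simp [emitA, List.getD, hxi, hxa, hne, hO]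
      · by_cases hB : lab = "B"
        · subst hB
          by_cases hEa : a = "E"
          · subst hEa
            simp [emitA, List.getD, hxi, hxa, hne, leadI]
          · by_cases hIa : a = "I"
            · subst hIa
              have hj : aJ l i = i + leadI ("I" :: t') := aJ_eq l _ i hdt
              set k := leadI ("I" :: t') with hkdef
              have hkle : k ≤ t'.length + 1 := by
                have := leadI_le ("I" :: t'); simpa [← hkdef] using this
              have hub : i + k + 1 ≤ l.length := by
                simp only [List.length_cons] at hlen; omega
              have hhead : (("I" :: t').drop k).head? = l[i + k + 1]? := by
                rw [List.head?_drop, ← hdt, List.getElem?_drop]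
                congr 1; omega
              have hiff : ((¬ i + k + 1 = l.length) ∧ l[i + k + 1]?.getD "" = "E") ↔
                  l[i + k + 1]? = some "E" := by
                constructor
                · rintro ⟨h1, h2⟩
                  have hlt2 : i + k + 1 < l.length := by omega
                  rw [List.getElem?_eq_getElem hlt2] at h2 ⊢
                  simp only [Option.getD_some] at h2
                  rw [h2]
                · intro hx
                  obtain ⟨hlt2, hv⟩ := List.getElem?_eq_some_iff.mp hx
                  exact ⟨by omega, by rw [hx]; rfl⟩
              have hEA : emitA l i =
                  if (¬ i + k + 1 = l.length) ∧ l[i + k + 1]?.getD "" = "E" then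
                    [((i : Int), (i : Int) + (k : Int) + 2)]
                  else [] := by
                simp only [emitA, List.getD, hxi, hxa, Option.getD_some, hj]
                simp [hne]
              rw [hEA, hhead]
              by_cases hc2 : l[i + k + 1]? = some "E"
              · rw [if_pos (hiff.mpr hc2), if_pos hc2]
                simp
              · rw [if_neg (fun hh => hc2 (hiff.mp hh)), if_neg hc2]
                simp
            · simp [emitA, List.getD, hxi, hxa, hne, hEa, hIa, leadI]
        · simp [emitA, List.getD, hxi, hS, hB]

-- ===== VERDICT (by name: the statement is the Claim_ definition above) =====
theorem get_span_nodict_spec : Claim_equal_get_span_nodict := by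
  intro l _
  show get_span_nodict l = get_span_nodict_alt l
  rw [foldA_eq, get_span_nodict_alt, bLoop_eq, List.range_eq_range',
    flatMap_emitA l l 0 (by simp)]
  simp [E1, E2]
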